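-- pv_equiv track=rewrite | github.com/suttipow/getting-started-streamlit | main.py | transform_age
-- ===== SOURCE A (Python) =====
-- def transform_age(ages):
--     new_data = []
--     for i in ages:
--         if i >= 46 :
--             new_data.append(3)
--         elif i >= 26:
--             new_data.append(2)
--         else:
--             new_data.append(1)
--     return new_data
-- ===== SOURCE B (Python) =====
-- def transform_age(ages):
--     # Staged passes: bucket = 1 + number of thresholds cleared.
--     out = [1] * len(ages)
--     for t in (26, 46):
--         out = [b + (a >= t) for a, b in zip(ages, out)]
--     return out
-- ===== Notes on version B (the rewrite author's own statement) =====
-- stated objective: alternative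
-- what changed: Replaces the per-element if/elif branch selection in one append loop by staged whole-list passes: initialise every bucket to 1, then for each threshold (26, 46) rebuild the list adding 1 where the age clears it, so the bucket is 1 + the count of cleared thresholds.
import Mathlib
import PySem

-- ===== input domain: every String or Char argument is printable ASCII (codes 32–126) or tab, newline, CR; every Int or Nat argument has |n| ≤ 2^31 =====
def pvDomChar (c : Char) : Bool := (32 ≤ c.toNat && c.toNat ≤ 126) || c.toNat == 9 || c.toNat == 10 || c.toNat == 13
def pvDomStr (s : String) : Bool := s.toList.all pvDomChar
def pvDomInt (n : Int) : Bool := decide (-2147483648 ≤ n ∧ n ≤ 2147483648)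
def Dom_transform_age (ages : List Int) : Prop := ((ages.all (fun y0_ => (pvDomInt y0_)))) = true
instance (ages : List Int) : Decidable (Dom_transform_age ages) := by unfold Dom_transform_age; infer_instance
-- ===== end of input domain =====

-- B replaces A's per-element if/elif append loop by staged whole-list passes: every
-- bucket starts at 1, then each threshold pass adds 1 where the age clears it
-- (bucket = 1 + count of cleared thresholds); same O(n) cost, different decomposition.

-- ===== PORT A =====
-- literal port: accumulate new_data, appending 3/2/1 by the same if/elif chain
def transform_age (ages : List Int) : List Int :=
  ages.foldl (fun new_data i =>
    if 46 ≤ i then new_data ++ [3]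
    else if 26 ≤ i then new_data ++ [2]
    else new_data ++ [1]) []

-- ===== PORT B =====
-- one threshold pass: [b + (a >= t) for a, b in zip(ages, out)]
def pvThresholdPass (ages : List Int) (out : List Int) (t : Int) : List Int :=
  (ages.zip out).map (fun p => p.2 + (if t ≤ p.1 then 1 else 0))

def transform_age_alt (ages : List Int) : List Int :=
  [(26 : Int), 46].foldl (pvThresholdPass ages) (List.replicate ages.length 1)

-- ===== PRECONDITION & SPEC =====
def Spec_transform_age (ages : List Int) (out : List Int) : Prop := out = transform_age_alt ages
instance (ages : List Int) (out : List Int) : Decidable (Spec_transform_age ages out) := by unfold Spec_transform_age; infer_instance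

-- ===== CLAIM =====
def Claim_equal_transform_age : Prop := ∀ (ages : List Int), Dom_transform_age ages → Spec_transform_age ages (transform_age ages)

-- ===== LEMMAS AND PROOFS =====

-- a threshold pass over a list already of the form `ages.map g` maps pointwise
theorem pv_pass_map (ages : List Int) (g : Int → Int) (t : Int) :
    pvThresholdPass ages (ages.map g) t
      = ages.map (fun a => g a + (if t ≤ a then 1 else 0)) := by
  induction ages with
  | nil => rfl
  | cons a l ih =>
    simp only [pvThresholdPass, List.map_cons, List.zip_cons_cons] at *
    exact congrArg _ ih

-- B equals the pointwise bucket map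
theorem pv_alt_eq (ages : List Int) :
    transform_age_alt ages
      = ages.map (fun a => 1 + (if 26 ≤ a then 1 else 0) + (if 46 ≤ a then (1 : Int) else 0)) := by
  have h0 : List.replicate ages.length (1 : Int) = ages.map (fun _ => 1) := by
    simp [List.map_const']
  simp only [transform_age_alt, List.foldl_cons, List.foldl_nil, h0,
    pv_pass_map]

-- A's foldl-append loop produces acc ++ map bucket ages
theorem pv_foldl_eq (ages : List Int) (acc : List Int) :
    ages.foldl (fun new_data i =>
      if 46 ≤ i then new_data ++ [3]
      else if 26 ≤ i then new_data ++ [2]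
      else new_data ++ [1]) acc
    = acc ++ ages.map (fun i => if 46 ≤ i then (3 : Int) else if 26 ≤ i then 2 else 1) := by
  induction ages generalizing acc with
  | nil => simp
  | cons a t ih =>
    simp only [List.foldl_cons, List.map_cons, ih]
    split_ifs <;> simp

-- ===== VERDICT =====
theorem transform_age_spec : Claim_equal_transform_age := by
  intro ages _
  unfold Spec_transform_age transform_age
  rw [pv_foldl_eq, pv_alt_eq, List.nil_append]
  refine List.map_congr_left fun i _ => ?_
  split_ifs <;> omega
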